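-- pv_equiv track=rewrite | github.com/AdaptivMCP/AdaptivMCP | github_mcp/command_classification.py | _split_pipeline
-- ===== SOURCE A (Python) =====
-- def _split_pipeline(parts: list[str]) -> list[list[str]]:
--     """Split a shlex token stream on pipes.
--
--     This is intentionally simple: it assumes shlex already respected quoting.
--     """
--
--     segments: list[list[str]] = [[]]
--     for tok in parts:
--         if tok == "|":
--             if segments[-1]:
--                 segments.append([])
--             continue
--         segments[-1].append(tok)
--     return [seg for seg in segments if seg]
-- ===== SOURCE B (Python) =====
-- def _split_pipeline(parts: list[str]) -> list[list[str]]: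
--     """Split a shlex token stream on pipes (recursive split at the first pipe)."""
--     if "|" not in parts:
--         return [parts] if parts else []
--     i = parts.index("|")
--     head = parts[:i]
--     rest = _split_pipeline(parts[i + 1:])
--     return ([head] if head else []) + rest
-- ===== Notes on version B (the rewrite author's own statement) =====
-- stated objective: alternative
-- what changed: Replaces A's single accumulator pass (mutable segments list with last-element guard and final empty filter) by a recursive divide-at-the-first-pipe algorithm using parts.index('|') and slicing, recursing on the suffix after the pipe.
import Mathlib
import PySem

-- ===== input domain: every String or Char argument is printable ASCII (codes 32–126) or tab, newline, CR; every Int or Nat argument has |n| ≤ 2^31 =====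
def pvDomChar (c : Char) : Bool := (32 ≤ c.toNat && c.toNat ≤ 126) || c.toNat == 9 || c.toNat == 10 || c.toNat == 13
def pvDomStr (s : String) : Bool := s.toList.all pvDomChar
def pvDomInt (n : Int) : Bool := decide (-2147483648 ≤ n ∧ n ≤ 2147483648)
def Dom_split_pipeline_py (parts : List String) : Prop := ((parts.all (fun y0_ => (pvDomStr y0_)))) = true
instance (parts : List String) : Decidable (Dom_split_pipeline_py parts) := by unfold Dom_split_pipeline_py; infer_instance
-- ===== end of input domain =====

-- B replaces A's single accumulator pass (last-element guard + final empty filter) by a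
-- recursive divide-at-the-first-pipe algorithm (index + slices); alternative, same result.


-- ===== PORT A =====
-- segments[-1].append(tok) : append tok to the last segment
def pvPushLast (segs : List (List String)) (tok : String) : List (List String) :=
  match segs with
  | [] => [[tok]]            -- unreachable: segments is never empty
  | [s] => [s ++ [tok]]
  | s :: rest => s :: pvPushLast rest tok

-- the loop body of A: one token updates the segments list
def pvStepA (segs : List (List String)) (tok : String) : List (List String) :=
  if tok = "|" then
    if ((segs.getLast?.getD []).isEmpty = false) then segs ++ [[]] else segs
  else
    pvPushLast segs tok

def split_pipeline_py (parts : List String) : List (List String) :=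
  (parts.foldl pvStepA [[]]).filter (fun seg => seg.isEmpty = false)

-- ===== PORT B =====
-- recursive: if "|" in parts, split at the first pipe (parts.index) and recurse on the suffix
def split_pipeline_py_alt (parts : List String) : List (List String) :=
  match h : PySem.List.index? parts "|" with
  | none => if parts.isEmpty then [] else [parts]        -- '"|" not in parts'
  | some i =>
      let head := PySem.List.slice parts none (some (i : Int))            -- parts[:i]
      let rest := split_pipeline_py_alt (PySem.List.slice parts (some ((i : Int) + 1)) none)  -- parts[i+1:]
      (if head.isEmpty then [] else [head]) ++ rest
  termination_by parts.length
  decreasing_by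
    obtain ⟨hk, -, -⟩ := PySem.List.getElem_of_index?_eq_some h
    have : PySem.List.slice parts (some ((i : Int) + 1)) none = parts.drop (i + 1) := by
      have := PySem.List.slice_from_natCast (xs := parts) (a := i + 1)
      simpa using this
    rw [this]
    simp [List.length_drop]
    omega

-- ===== PRECONDITION & SPEC =====
def Spec_split_pipeline_py (parts : List String) (out : List (List String)) : Prop := out = split_pipeline_py_alt parts
instance (parts : List String) (out : List (List String)) : Decidable (Spec_split_pipeline_py parts out) := by unfold Spec_split_pipeline_py; infer_instance

-- ===== CLAIM (what is proved, stated in full; the proofs are below) =====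
def Claim_equal_split_pipeline_py : Prop := ∀ (parts : List String), Dom_split_pipeline_py parts → Spec_split_pipeline_py parts (split_pipeline_py parts)

-- ===== LEMMAS AND PROOFS =====

-- proof-side reference function: maximal runs of non-pipe tokens
def pvGroups : List String → List (List String)
  | [] => []
  | t :: ts =>
    if t = "|" then pvGroups ts
    else (t :: ts.takeWhile (fun u => u ≠ "|")) :: pvGroups (ts.dropWhile (fun u => u ≠ "|"))
  termination_by l => l.length
  decreasing_by
    all_goals simp only [List.length_cons]
    · omega
    · have h := List.length_dropWhile_le (fun u => decide (u ≠ "|")) ts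
      omega

-- abstract version of A's pending state: done segments already closed, cur the open one
def pvPend (cur : List String) : List String → List (List String)
  | [] => if cur.isEmpty then [] else [cur]
  | t :: ts =>
    if t = "|" then (if cur.isEmpty then pvPend [] ts else cur :: pvPend [] ts)
    else pvPend (cur ++ [t]) ts

theorem pvPushLast_concat (done : List (List String)) (cur : List String) (t : String) :
    pvPushLast (done ++ [cur]) t = done ++ [cur ++ [t]] := by
  induction done with
  | nil => simp [pvPushLast]
  | cons s rest ih =>
    cases rest with
    | nil => simp [pvPushLast]
    | cons a b => simpa [pvPushLast] using ih

theorem pvPend_spec (parts : List String) :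
    pvPend [] parts = pvGroups parts ∧
    ∀ cur, cur ≠ [] →
      pvPend cur parts =
        (cur ++ parts.takeWhile (fun u => u ≠ "|")) :: pvGroups (parts.dropWhile (fun u => u ≠ "|")) := by
  induction parts with
  | nil =>
    constructor
    · simp [pvPend, pvGroups]
    · intro cur h; simp [pvPend, pvGroups, List.isEmpty_iff, h]
  | cons t ts ih =>
    obtain ⟨ih1, ih2⟩ := ih
    by_cases ht : t = "|"
    · subst ht
      constructor
      · simpa [pvPend, pvGroups] using ih1
      · intro cur h
        simp [pvPend, pvGroups, List.isEmpty_iff, h, ih1, List.takeWhile, List.dropWhile]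
    · constructor
      · simp only [pvPend, if_neg ht, List.isEmpty]
        rw [List.nil_append, ih2 [t] (by simp)]
        simp [pvGroups, ht]
      · intro cur h
        simp only [pvPend, if_neg ht, List.takeWhile_cons, List.dropWhile_cons]
        rw [ih2 (cur ++ [t]) (by simp)]
        simp [ht]

theorem pvFilter_done (done : List (List String)) (h : ∀ s ∈ done, s ≠ []) :
    done.filter (fun seg => seg.isEmpty = false) = done := by
  rw [List.filter_eq_self]
  intro a ha
  simpa [List.isEmpty_iff] using h a ha

theorem pvInv (parts : List String) : ∀ (done : List (List String)) (cur : List String),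
    (∀ s ∈ done, s ≠ []) →
    (parts.foldl pvStepA (done ++ [cur])).filter (fun seg => seg.isEmpty = false)
      = done ++ pvPend cur parts := by
  induction parts with
  | nil =>
    intro done cur h
    rw [List.foldl_nil, List.filter_append, pvFilter_done done h]
    by_cases hc : cur = []
    · subst hc; simp [pvPend]
    · simp [pvPend, hc, List.isEmpty_iff]
  | cons t ts ih =>
    intro done cur h
    by_cases ht : t = "|"
    · subst ht
      by_cases hc : cur = []
      · subst hc
        simp only [List.foldl_cons]
        rw [show pvStepA (done ++ [[]]) "|" = done ++ [[]] by
              simp [pvStepA]]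
        rw [ih done [] h]
        simp [pvPend]
      · simp only [List.foldl_cons]
        rw [show pvStepA (done ++ [cur]) "|" = (done ++ [cur]) ++ [[]] by
              simp [pvStepA, hc]]
        rw [ih (done ++ [cur]) []
              (by intro s hs
                  rcases List.mem_append.1 hs with h1 | h1
                  · exact h s h1
                  · simp at h1; simp [h1, hc])]
        simp [pvPend, List.isEmpty_iff, hc]
    · simp only [List.foldl_cons]
      rw [show pvStepA (done ++ [cur]) t = done ++ [cur ++ [t]] by
            simp [pvStepA, ht, pvPushLast_concat]]
      rw [ih done (cur ++ [t]) h]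
      simp [pvPend, ht]

-- pvGroups splits cleanly at the first pipe
theorem pvGroups_break (pre suf : List String) (hp : "|" ∉ pre) :
    pvGroups (pre ++ "|" :: suf) = (if pre.isEmpty then [] else [pre]) ++ pvGroups suf := by
  cases pre with
  | nil => simp [pvGroups]
  | cons h t =>
    have hh : h ≠ "|" := by intro e; exact hp (by simp [e])
    have ht : "|" ∉ t := fun m => hp (by simp [m])
    rw [show (h :: t) ++ "|" :: suf = h :: (t ++ "|" :: suf) by simp]
    rw [pvGroups, if_neg hh]
    have hall : ∀ a ∈ t, ¬ a = "|" := by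
      intro a ha e; exact ht (e ▸ ha)
    have hptw : List.takeWhile (fun u => decide (u ≠ "|")) t = t :=
      List.takeWhile_eq_self_iff.2 (by intro a ha; simpa using hall a ha)
    have hpdw : List.dropWhile (fun u => decide (u ≠ "|")) t = [] :=
      List.dropWhile_eq_nil_iff.2 (by intro a ha; simpa using hall a ha)
    have htw : (t ++ "|" :: suf).takeWhile (fun u => u ≠ "|") = t := by
      simp [List.takeWhile_append]
      exact fun _ => hall
    have hdw : (t ++ "|" :: suf).dropWhile (fun u => u ≠ "|") = "|" :: suf := by
      simp [List.dropWhile_append]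
      exact fun _ => hall
    rw [htw, hdw]
    simp [pvGroups]

-- no pipe anywhere: one group (or none)
theorem pvGroups_no_pipe (parts : List String) (hp : "|" ∉ parts) :
    pvGroups parts = if parts.isEmpty then [] else [parts] := by
  cases parts with
  | nil => simp [pvGroups]
  | cons t ts =>
    have ht : t ≠ "|" := by intro e; exact hp (by simp [e])
    have hts : "|" ∉ ts := fun m => hp (by simp [m])
    have hall : ∀ a ∈ ts, ¬ a = "|" := by
      intro a ha e; exact hts (e ▸ ha)
    rw [pvGroups, if_neg ht,
        List.takeWhile_eq_self_iff.2 (by intro a ha; simpa using hall a ha),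
        List.dropWhile_eq_nil_iff.2 (by intro a ha; simpa using hall a ha)]
    simp [pvGroups]

theorem pvAlt_eq_groups (parts : List String) :
    split_pipeline_py_alt parts = pvGroups parts := by
  rw [split_pipeline_py_alt]
  split
  · rename_i h
    rw [pvGroups_no_pipe parts ((PySem.List.index?_eq_none_iff _ _).1 h)]
  · rename_i i h
    obtain ⟨pre, suf, hps, hlen, hpre⟩ := (PySem.List.index?_eq_some_iff _ _ _).1 h
    have hslice1 : PySem.List.slice parts none (some (i : Int)) = parts.take i := by
      simpa using PySem.List.slice_to_natCast (xs := parts) (b := i)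
    have hslice2 : PySem.List.slice parts (some ((i : Int) + 1)) none = parts.drop (i + 1) := by
      simpa using PySem.List.slice_from_natCast (xs := parts) (a := i + 1)
    have htake : parts.take i = pre := by
      rw [hps, ← hlen, List.take_left]
    have hdrop : parts.drop (i + 1) = suf := by
      rw [hps, ← hlen]
      simp [List.drop_append]
    rw [hslice1, hslice2, htake, hdrop, hps, pvGroups_break pre suf hpre]
    show (if pre.isEmpty then [] else [pre]) ++ split_pipeline_py_alt suf
        = (if pre.isEmpty then [] else [pre]) ++ pvGroups suf
    rw [pvAlt_eq_groups suf]
  termination_by parts.length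
  decreasing_by
    have hlen2 : parts.length = pre.length + suf.length + 1 := by
      rw [hps]; simp [List.length_append]; omega
    omega

-- ===== VERDICT (by name: the statement is the Claim_ definition above) =====
theorem split_pipeline_py_spec : Claim_equal_split_pipeline_py := by
  intro parts _
  unfold Spec_split_pipeline_py split_pipeline_py
  rw [pvAlt_eq_groups]
  have := pvInv parts [] [] (by simp)
  simpa [(pvPend_spec parts).1] using this
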